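-- pv_equiv track=rewrite | github.com/JimcostDev/python_programming_fundamentals | exercises/mcm_mcd.py | obtener_factores_comunes
-- ===== SOURCE A (Python) =====
-- def factorizar(num):
--     factores = []
--     divisor = 2
--     while divisor <= num:
--         if num % divisor == 0:
--             factores.append(divisor)
--             num //= divisor
--         else:
--             divisor += 1
--     return factores
--
-- def obtener_factores_comunes(numeros):
--     factores_comunes = []
--     conteo_factores = {}
--     for num in numeros:
--         factores = factorizar(num)
--         conteo_factores[num] = {}
--         for factor in factores:
--             if factor in conteo_factores[num]:
--                 conteo_factores[num][factor] += 1
--             else: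
--                 conteo_factores[num][factor] = 1
--             if factor not in factores_comunes:
--                 factores_comunes.append(factor)
--     return factores_comunes, conteo_factores
-- ===== SOURCE B (Python) =====
-- def _factorizar_pares(num):
--     # trial division up to sqrt(num): list of (prime, exponent) in increasing prime order
--     pares = []
--     n = num
--     d = 2
--     while d * d <= n:
--         if n % d == 0:
--             e = 0
--             while n % d == 0:
--                 e += 1
--                 n //= d
--             pares.append((d, e))
--         d += 1
--     if n > 1:
--         pares.append((n, 1))
--     return pares
--
-- def obtener_factores_comunes(numeros):
--     factores_comunes = []
--     conteo_factores = {}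
--     for num in numeros:
--         pares = _factorizar_pares(num)
--         conteo_factores[num] = dict(pares)
--         for p, _e in pares:
--             if p not in factores_comunes:
--                 factores_comunes.append(p)
--     return factores_comunes, conteo_factores
-- ===== Notes on version B (the rewrite author's own statement) =====
-- stated objective: faster
-- what changed: A factorises each number by walking a divisor one step at a time up to the number itself and then re-counts the repeated factors into a dict; B trial-divides only up to sqrt(n), dividing out each prime completely and emitting (prime, exponent) pairs directly, with the remaining cofactor appended as the last prime.
import Mathlib
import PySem

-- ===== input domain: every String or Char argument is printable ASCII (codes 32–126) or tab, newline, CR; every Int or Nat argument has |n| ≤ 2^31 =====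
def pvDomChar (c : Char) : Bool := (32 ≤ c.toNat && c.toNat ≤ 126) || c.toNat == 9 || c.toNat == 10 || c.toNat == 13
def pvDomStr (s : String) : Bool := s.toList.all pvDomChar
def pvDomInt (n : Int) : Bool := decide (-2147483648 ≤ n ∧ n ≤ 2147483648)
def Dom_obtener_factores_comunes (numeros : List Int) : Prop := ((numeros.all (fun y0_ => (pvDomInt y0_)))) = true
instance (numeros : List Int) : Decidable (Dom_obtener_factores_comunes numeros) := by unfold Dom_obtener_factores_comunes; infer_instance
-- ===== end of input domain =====

-- B replaces A's one-divisor-at-a-time factorisation (which walks the divisor up to the number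
-- itself) by trial division with exponent counting up to √n plus the remaining prime, collecting
-- (prime, exponent) pairs directly instead of re-counting a list of repeated factors.

-- ===== PORT A =====
-- termination facts for the ports, named so the decreasing_by proofs are plain applications
theorem pv_dec_div (num divisor : Int) (h1 : 2 ≤ divisor) (h2 : divisor ≤ num) :
    (2 * (num / divisor) - divisor).toNat < (2 * num - divisor).toNat := by
  have h3 : num / divisor < num := by
    rw [Int.ediv_lt_iff_lt_mul (by omega)]; nlinarith
  omega

theorem pv_dec_step (num divisor : Int) (h1 : 2 ≤ divisor) (h2 : divisor ≤ num) :
    (2 * num - (divisor + 1)).toNat < (2 * num - divisor).toNat := by omega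

-- while divisor <= num: the '2 ≤ divisor' conjunct only makes the recursion well-founded;
-- every call the program makes has divisor ≥ 2.  '%' and '/' are exact here: inside the loop
-- both operands are positive, where Python's % and // agree with Lean's Int.emod / Int.ediv.
def factorizarLoop (num divisor : Int) : List Int :=
  if h : 2 ≤ divisor ∧ divisor ≤ num then
    if num % divisor = 0 then
      divisor :: factorizarLoop (num / divisor) divisor
    else
      factorizarLoop num (divisor + 1)
  else []
termination_by (2 * num - divisor).toNat
decreasing_by
  · exact pv_dec_div num divisor h.1 h.2
  · exact pv_dec_step num divisor h.1 h.2

def factorizar (num : Int) : List Int := factorizarLoop num 2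

def obtener_factores_comunes (numeros : List Int) : List Int × (List (Int × List (Int × Int))) :=
  let st := numeros.foldl
    (fun (st : List Int × PySem.Dict Int (PySem.Dict Int Int)) num =>
      let factores := factorizar num
      -- conteo_factores[num] = {}; then the inner for-loop updates that fresh inner dict
      -- and factores_comunes together
      let inner := factores.foldl
        (fun (p : List Int × PySem.Dict Int Int) factor =>
          let d := if p.2.contains factor then p.2.insert factor (p.2.getD factor 0 + 1)
                   else p.2.insert factor 1
          let fc := if factor ∈ p.1 then p.1 else p.1 ++ [factor]
          (fc, d))
        (st.1, PySem.Dict.empty)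
      (inner.1, st.2.insert num inner.2))
    ([], PySem.Dict.empty)
  (st.1, st.2.items.map (fun kv => (kv.1, kv.2.items)))

-- ===== PORT B =====
-- inner 'while num % d == 0' loop of _factorizar_pares: counts the exponent and divides out;
-- the guard's '2 ≤ d ∧ 0 < n' conjuncts only make the recursion well-founded (always true at
-- the call sites).  Returns (exponent, leftover).
theorem pv_dec_ediv (n d : Int) (h1 : 2 ≤ d) (h2 : 0 < n) : (n / d).toNat < n.toNat := by
  have h3 : n / d < n := by rw [Int.ediv_lt_iff_lt_mul (by omega)]; nlinarith
  have h4 : 0 ≤ n / d := Int.ediv_nonneg (by omega) (by omega)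
  omega

def divideOut (n d : Int) : Int × Int :=
  if h : 2 ≤ d ∧ 0 < n ∧ n % d = 0 then
    let r := divideOut (n / d) d
    (r.1 + 1, r.2)
  else (0, n)
termination_by n.toNat
decreasing_by exact pv_dec_ediv n d h.1 h.2.1

-- the next two lemmas are needed by factBLoop's termination proof, so they stay above the port
theorem divideOut_snd_le (n d : Int) : (divideOut n d).2 ≤ n := by
  fun_induction divideOut n d with
  | case1 n h r ih =>
    have h1 : n / d ≤ n := Int.ediv_le_self d (by omega)
    simpa [r] using le_trans ih h1
  | case2 n h => exact le_refl n

theorem divideOut_snd_lt (n d : Int) (hd : 2 ≤ d) (hn : 0 < n) (hm : n % d = 0) :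
    (divideOut n d).2 < n := by
  rw [divideOut]
  rw [dif_pos ⟨hd, hn, hm⟩]
  have h1 : n / d < n := by rw [Int.ediv_lt_iff_lt_mul (by omega)]; nlinarith
  exact lt_of_le_of_lt (divideOut_snd_le (n / d) d) h1

theorem pv_dec_fact1 (n d : Int) (h1 : 2 ≤ d) (h2 : d * d ≤ n) (hm : n % d = 0) :
    (2 * (divideOut n d).2 - (d + 1)).toNat < (2 * n - d).toNat := by
  have h0 : 0 < n := by nlinarith
  have h3 := divideOut_snd_lt n d h1 h0 hm
  have h4 : 2 * d ≤ d * d := by nlinarith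
  omega

theorem pv_dec_fact2 (n d : Int) (h1 : 2 ≤ d) (h2 : d * d ≤ n) :
    (2 * n - (d + 1)).toNat < (2 * n - d).toNat := by
  have h3 : 2 * d ≤ d * d := by nlinarith
  omega

-- 'while d*d <= n' loop of _factorizar_pares plus the trailing 'if n > 1' append.
def factBLoop (n d : Int) : List (Int × Int) :=
  if h : 2 ≤ d ∧ d * d ≤ n then
    if hm : n % d = 0 then
      let r := divideOut n d
      (d, r.1) :: factBLoop r.2 (d + 1)
    else
      factBLoop n (d + 1)
  else if 1 < n then [(n, 1)] else []
termination_by (2 * n - d).toNat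
decreasing_by
  · exact pv_dec_fact1 n d h.1 h.2 hm
  · exact pv_dec_fact2 n d h.1 h.2

def obtener_factores_comunes_alt (numeros : List Int) : List Int × (List (Int × List (Int × Int))) :=
  let st := numeros.foldl
    (fun (st : List Int × PySem.Dict Int (PySem.Dict Int Int)) num =>
      let pares := factBLoop num 2
      let fc := pares.foldl (fun fc p => if p.1 ∈ fc then fc else fc ++ [p.1]) st.1
      (fc, st.2.insert num (PySem.Dict.ofList pares)))   -- conteo_factores[num] = dict(pares)
    ([], PySem.Dict.empty)
  (st.1, st.2.items.map (fun kv => (kv.1, kv.2.items)))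

-- ===== PRECONDITION & SPEC =====
def Spec_obtener_factores_comunes (numeros : List Int) (out : List Int × (List (Int × List (Int × Int)))) : Prop := out = obtener_factores_comunes_alt numeros
instance (numeros : List Int) (out : List Int × (List (Int × List (Int × Int)))) : Decidable (Spec_obtener_factores_comunes numeros out) := by unfold Spec_obtener_factores_comunes; infer_instance

-- ===== CLAIM (what is proved, stated in full; the proofs are below) =====
def Claim_equal_obtener_factores_comunes : Prop := ∀ (numeros : List Int), Dom_obtener_factores_comunes numeros → Spec_obtener_factores_comunes numeros (obtener_factores_comunes numeros)

-- ===== LEMMAS AND PROOFS =====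

-- the factor list a (prime, exponent) list denotes: each prime repeated exponent times
def expandPares (ps : List (Int × Int)) : List Int :=
  ps.flatMap (fun p => List.replicate p.2.toNat p.1)

-- the body of A's inner for-loop, named for the lemmas (defeq to the lambda in the port)
def stepA (p : List Int × PySem.Dict Int Int) (factor : Int) : List Int × PySem.Dict Int Int :=
  let d := if p.2.contains factor then p.2.insert factor (p.2.getD factor 0 + 1)
           else p.2.insert factor 1
  let fc := if factor ∈ p.1 then p.1 else p.1 ++ [factor]
  (fc, d)

theorem divideOut_fst_nonneg (n d : Int) : 0 ≤ (divideOut n d).1 := by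
  fun_induction divideOut n d with
  | case1 n h r ih => simp [r]; omega
  | case2 n h => simp

theorem divideOut_fst_pos (n d : Int) (hd : 2 ≤ d) (hn : 0 < n) (hm : n % d = 0) :
    1 ≤ (divideOut n d).1 := by
  rw [divideOut, dif_pos ⟨hd, hn, hm⟩]
  have := divideOut_fst_nonneg (n / d) d
  simpa using by omega

-- A's repeated division at a fixed divisor is exactly: the divisor replicated
-- (divideOut n d).1 times, then the loop continued on the leftover
theorem divideOut_spec (n d : Int) (hd : 2 ≤ d) (hn : 0 < n) :
    0 < (divideOut n d).2 ∧ (divideOut n d).2 ∣ n ∧ ¬ d ∣ (divideOut n d).2 ∧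
      factorizarLoop n d =
        List.replicate (divideOut n d).1.toNat d ++ factorizarLoop (divideOut n d).2 d := by
  induction n using divideOut.induct (d := d) with
  | case1 n h ih =>
    obtain ⟨_, hn', hm⟩ := h
    have hdvd : d ∣ n := (PySem.Int.emod_eq_zero_iff_dvd n d).mp hm
    have hq : n / d * d = n := Int.ediv_mul_cancel hdvd
    have hqpos : 0 < n / d := by nlinarith
    obtain ⟨ih1, ih2, ih3, ih4⟩ := ih hqpos
    have hqd : n / d ∣ n := ⟨d, by omega⟩
    have hnn : 0 ≤ (divideOut (n / d) d).1 := divideOut_fst_nonneg (n / d) d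
    rw [divideOut, dif_pos ⟨hd, hn', hm⟩]
    refine ⟨ih1, dvd_trans ih2 hqd, ih3, ?_⟩
    rw [factorizarLoop, dif_pos ⟨hd, Int.le_of_dvd hn' hdvd⟩, if_pos hm, ih4]
    have : ((divideOut (n / d) d).1 + 1).toNat = (divideOut (n / d) d).1.toNat + 1 := by omega
    simp [this, List.replicate_succ]
  | case2 n h =>
    have hm : ¬ n % d = 0 := fun hc => h ⟨hd, hn, hc⟩
    rw [divideOut, dif_neg h]
    exact ⟨hn, dvd_refl n, fun hc => hm ((PySem.Int.emod_eq_zero_iff_dvd n d).mpr hc),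
      by simp⟩

theorem factorizarLoop_skip (m d : Int) (hd : 2 ≤ d) (hnd : ¬ d ∣ m) :
    factorizarLoop m d = factorizarLoop m (d + 1) := by
  have hm : ¬ m % d = 0 := fun hc => hnd ((PySem.Int.emod_eq_zero_iff_dvd m d).mp hc)
  by_cases hle : d ≤ m
  · rw [factorizarLoop, dif_pos ⟨hd, hle⟩, if_neg hm]
  · rw [factorizarLoop, dif_neg (by omega), factorizarLoop, dif_neg (by omega)]

theorem factorizarLoop_self (n : Int) (hn : 2 ≤ n) : factorizarLoop n n = [n] := by
  rw [factorizarLoop, dif_pos ⟨hn, le_refl n⟩, if_pos Int.emod_self,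
    Int.ediv_self (by omega), factorizarLoop, dif_neg (by omega)]

theorem factorizarLoop_prime_key (n : Int) (hn : 2 ≤ n) :
    ∀ (k : Nat) (d : Int), 2 ≤ d → d ≤ n → (∀ e, d ≤ e → e < n → ¬ e ∣ n) →
      (n - d).toNat ≤ k → factorizarLoop n d = [n] := by
  intro k
  induction k with
  | zero =>
    intro d hd hdn hnone hk
    have hdn' : d = n := by omega
    rw [hdn']
    exact factorizarLoop_self n hn
  | succ k ih =>
    intro d hd hdn hnone hk
    by_cases hdn2 : d = n
    · rw [hdn2]; exact factorizarLoop_self n hn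
    · have hlt : d < n := by omega
      have hnd : ¬ d ∣ n := hnone d (le_refl d) hlt
      rw [factorizarLoop_skip n d hd hnd]
      exact ih (d + 1) (by omega) (by omega) (fun e he => hnone e (by omega)) (by omega)

-- when every candidate below d has been ruled out and d² > n, the loop walks d up to n and emits n
theorem factorizarLoop_prime (n d : Int) (hd : 2 ≤ d) (hn : 2 ≤ n) (hsq : n < d * d)
    (hinv : ∀ e, 2 ≤ e → e < d → ¬ e ∣ n) : factorizarLoop n d = [n] := by
  have hdn : d ≤ n := by
    by_contra hc
    exact hinv n hn (by omega) (dvd_refl n)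
  have hnone : ∀ e, d ≤ e → e < n → ¬ e ∣ n := by
    intro e he hlt hdvd
    have hc : n / e * e = n := Int.ediv_mul_cancel hdvd
    set c := n / e with hcdef
    have hcpos : 0 < c := by nlinarith
    have hcne : c ≠ 1 := by intro h1; rw [h1] at hc; omega
    have hc2 : 2 ≤ c := by omega
    have hclt : c < d := by nlinarith
    exact hinv c hc2 hclt ⟨e, by omega⟩
  exact factorizarLoop_prime_key n hn (n - d).toNat d hd hdn hnone (le_refl _)

-- the central equation: A's factor list is B's (prime, exponent) list, expanded
theorem factorizarLoop_eq_expand (n d : Int) :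
    2 ≤ d → (∀ e, 2 ≤ e → e < d → ¬ e ∣ n) →
    factorizarLoop n d = expandPares (factBLoop n d) := by
  fun_induction factBLoop n d with
  | case1 n d h hm r ih =>
    intro hd hinv
    obtain ⟨hd2, hsq⟩ := h
    have hn : 0 < n := by nlinarith
    obtain ⟨hpos, hdvd, hnd, heq⟩ := divideOut_spec n d hd2 hn
    rw [heq, factorizarLoop_skip _ d hd2 hnd]
    rw [ih (by omega) ?_]
    · simp [expandPares, r]
    · intro e he hlt hedvd
      by_cases hed : e = d
      · rw [hed] at hedvd; exact hnd hedvd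
      · exact hinv e he (by omega) (dvd_trans hedvd hdvd)
  | case2 n d h hm ih =>
    intro hd hinv
    obtain ⟨hd2, hsq⟩ := h
    have hnd : ¬ d ∣ n := fun hc => hm ((PySem.Int.emod_eq_zero_iff_dvd n d).mpr hc)
    rw [factorizarLoop_skip n d hd2 hnd]
    refine ih (by omega) ?_
    intro e he hlt hedvd
    by_cases hed : e = d
    · rw [hed] at hedvd; exact hnd hedvd
    · exact hinv e he (by omega) hedvd
  | case3 n d h hn =>
    intro hd hinv
    have hsq : n < d * d := by
      by_contra hc
      exact h ⟨hd, by omega⟩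
    rw [factorizarLoop_prime n d hd (by omega) hsq hinv]
    simp [expandPares]
  | case4 n d h hn =>
    intro hd hinv
    rw [factorizarLoop, dif_neg (by omega)]
    simp [expandPares]

-- shape of B's pair list: primes at least d, exponents at least 1, strictly increasing primes
theorem factBLoop_shape (n d : Int) :
    2 ≤ d → (∀ e, 2 ≤ e → e < d → ¬ e ∣ n) →
    (∀ p ∈ factBLoop n d, d ≤ p.1 ∧ 1 ≤ p.2) ∧
      (factBLoop n d).Pairwise (fun a b => a.1 < b.1) := by
  fun_induction factBLoop n d with
  | case1 n d h hm r ih =>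
    intro hd hinv
    obtain ⟨hd2, hsq⟩ := h
    have hn : 0 < n := by nlinarith
    obtain ⟨hpos, hdvd, hnd, heq⟩ := divideOut_spec n d hd2 hn
    have hinv' : ∀ e, 2 ≤ e → e < d + 1 → ¬ e ∣ (divideOut n d).2 := by
      intro e he hlt hedvd
      by_cases hed : e = d
      · rw [hed] at hedvd; exact hnd hedvd
      · exact hinv e he (by omega) (dvd_trans hedvd hdvd)
    obtain ⟨ih1, ih2⟩ := ih (by omega) hinv'
    constructor
    · intro p hp
      rcases List.mem_cons.mp hp with hp | hp
      · rw [hp]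
        exact ⟨le_refl d, divideOut_fst_pos n d hd2 hn hm⟩
      · have := ih1 p hp
        exact ⟨by omega, this.2⟩
    · exact List.pairwise_cons.mpr ⟨fun q hq => by have := (ih1 q hq).1; simp; omega, ih2⟩
  | case2 n d h hm ih =>
    intro hd hinv
    obtain ⟨hd2, hsq⟩ := h
    have hnd : ¬ d ∣ n := fun hc => hm ((PySem.Int.emod_eq_zero_iff_dvd n d).mpr hc)
    have hinv' : ∀ e, 2 ≤ e → e < d + 1 → ¬ e ∣ n := by
      intro e he hlt hedvd
      by_cases hed : e = d
      · rw [hed] at hedvd; exact hnd hedvd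
      · exact hinv e he (by omega) hedvd
    obtain ⟨ih1, ih2⟩ := ih (by omega) hinv'
    exact ⟨fun p hp => ⟨by have := (ih1 p hp).1; omega, (ih1 p hp).2⟩, ih2⟩
  | case3 n d h hn =>
    intro hd hinv
    have hdn : d ≤ n := by
      by_contra hc
      exact hinv n (by omega) (by omega) (dvd_refl n)
    refine ⟨?_, by simp⟩
    intro p hp
    simp at hp
    rw [hp]
    exact ⟨hdn, by norm_num⟩
  | case4 n d h hn =>
    intro hd hinv
    simp

-- A's counter loop over j more copies of a key already present with count c
theorem stepA_replicate_present (x : Int) (j : Nat) :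
    ∀ (c : Int) (fc : List Int) (L : List (Int × Int)), x ∈ fc → (∀ q ∈ L, q.1 ≠ x) →
    (List.replicate j x).foldl stepA (fc, PySem.Dict.mk (L ++ [(x, c)])) =
      (fc, PySem.Dict.mk (L ++ [(x, c + j)])) := by
  induction j with
  | zero => intro c fc L hfc hL; simp
  | succ j ih =>
    intro c fc L hfc hL
    rw [List.replicate_succ, List.foldl_cons]
    have hfind : L.find? (fun p => p.1 == x) = none :=
      List.find?_eq_none.mpr (fun q hq => by simp [hL q hq])
    have hmap : L.map (fun p => if p.1 = x then (x, c + 1) else p) = L := by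
      have hid : ∀ q ∈ L, (if q.1 = x then ((x, c + 1) : Int × Int) else q) = id q :=
        fun q hq => by simp [hL q hq]
      rw [List.map_congr_left hid, List.map_id]
    have hstep : stepA (fc, PySem.Dict.mk (L ++ [(x, c)])) x =
        (fc, PySem.Dict.mk (L ++ [(x, c + 1)])) := by
      simp only [stepA]
      simp [PySem.Dict.contains, PySem.Dict.insert, PySem.Dict.get?, PySem.Dict.getD,
        List.any_append, List.find?_append, hfind, hfc, List.map_append, hmap]
    rw [hstep, ih (c + 1) fc L hfc hL]
    have harith : c + 1 + (j : Int) = c + ((j + 1 : Nat) : Int) := by push_cast; ring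
    rw [harith]

-- A's counter loop over one block of e copies of a fresh key
theorem stepA_replicate_fresh (x e : Int) (he : 1 ≤ e) (fc : List Int) (L : List (Int × Int))
    (hL : ∀ q ∈ L, q.1 ≠ x) :
    (List.replicate e.toNat x).foldl stepA (fc, PySem.Dict.mk L) =
      ((if x ∈ fc then fc else fc ++ [x]), PySem.Dict.mk (L ++ [(x, e)])) := by
  obtain ⟨k, hk⟩ : ∃ k, e.toNat = k + 1 := ⟨e.toNat - 1, by omega⟩
  rw [hk, List.replicate_succ, List.foldl_cons]
  have hcont : (PySem.Dict.mk L).contains x = false := by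
    simp only [PySem.Dict.contains, List.any_eq_false]
    intro q hq
    simpa using hL q hq
  have hstep : stepA (fc, PySem.Dict.mk L) x =
      ((if x ∈ fc then fc else fc ++ [x]), PySem.Dict.mk (L ++ [(x, 1)])) := by
    simp only [stepA]
    simp [PySem.Dict.insert, hcont]
  have hfc' : x ∈ (if x ∈ fc then fc else fc ++ [x]) := by
    by_cases h : x ∈ fc <;> simp [h]
  rw [hstep, stepA_replicate_present x k 1 _ L hfc' hL]
  have harith : (1 : Int) + (k : Int) = e := by omega
  rw [harith]

-- A's whole inner loop over the expanded factor list, against B's fold over the pair list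
theorem stepA_expand (ps : List (Int × Int)) :
    ∀ (fc : List Int) (L : List (Int × Int)),
    (∀ p ∈ ps, 1 ≤ p.2) → ps.Pairwise (fun a b => a.1 < b.1) →
    (∀ p ∈ ps, ∀ q ∈ L, q.1 ≠ p.1) →
    (expandPares ps).foldl stepA (fc, PySem.Dict.mk L) =
      (ps.foldl (fun fc p => if p.1 ∈ fc then fc else fc ++ [p.1]) fc,
        PySem.Dict.mk (L ++ ps)) := by
  induction ps with
  | nil => intro fc L _ _ _; simp [expandPares]
  | cons p rest ih =>
    intro fc L hsnd hpair hfresh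
    have hsplit : expandPares (p :: rest) = List.replicate p.2.toNat p.1 ++ expandPares rest := by
      simp [expandPares]
    rw [hsplit, List.foldl_append]
    rw [stepA_replicate_fresh p.1 p.2 (hsnd p List.mem_cons_self) fc L
      (fun q hq => hfresh p List.mem_cons_self q hq)]
    have hpc := List.pairwise_cons.mp hpair
    rw [ih _ (L ++ [(p.1, p.2)]) (fun q hq => hsnd q (List.mem_cons_of_mem p hq))
      hpc.2 ?_]
    · simp
    · intro q hq r hr
      rcases List.mem_append.mp hr with hr | hr
      · exact hfresh q (List.mem_cons_of_mem p hq) r hr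
      · simp at hr
        rw [hr]
        exact ne_of_lt (hpc.1 q hq)

-- dict(pares): inserting pairwise-fresh keys appends them in order
theorem foldl_insert_fresh (ps : List (Int × Int)) :
    ∀ (D : PySem.Dict Int Int), (∀ p ∈ ps, D.contains p.1 = false) →
    ps.Pairwise (fun a b => a.1 ≠ b.1) →
    ps.foldl (fun acc p => acc.insert p.1 p.2) D = PySem.Dict.mk (D.items ++ ps) := by
  induction ps with
  | nil => intro D _ _; simp
  | cons p rest ih =>
    intro D hfresh hpair
    rw [List.foldl_cons]
    have hins : D.insert p.1 p.2 = PySem.Dict.mk (D.items ++ [p]) := by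
      rw [PySem.Dict.insert, if_neg (by simp [hfresh p List.mem_cons_self])]
    rw [hins]
    have hpc := List.pairwise_cons.mp hpair
    rw [ih _ ?_ hpc.2]
    · simp
    · intro q hq
      have hD := hfresh q (List.mem_cons_of_mem p hq)
      simp only [PySem.Dict.contains, List.any_eq_false] at hD ⊢
      intro r hr
      rcases List.mem_append.mp hr with hr | hr
      · exact hD r hr
      · simp only [List.mem_singleton] at hr
        rw [hr]
        simpa using hpc.1 q hq

-- the two per-number loop bodies agree
theorem step_eq :
    (fun (st : List Int × PySem.Dict Int (PySem.Dict Int Int)) num =>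
      let factores := factorizar num
      let inner := factores.foldl
        (fun (p : List Int × PySem.Dict Int Int) factor =>
          let d := if p.2.contains factor then p.2.insert factor (p.2.getD factor 0 + 1)
                   else p.2.insert factor 1
          let fc := if factor ∈ p.1 then p.1 else p.1 ++ [factor]
          (fc, d))
        (st.1, PySem.Dict.empty)
      (inner.1, st.2.insert num inner.2))
    = (fun (st : List Int × PySem.Dict Int (PySem.Dict Int Int)) num =>
      let pares := factBLoop num 2
      let fc := pares.foldl (fun fc p => if p.1 ∈ fc then fc else fc ++ [p.1]) st.1
      (fc, st.2.insert num (PySem.Dict.ofList pares))) := by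
  funext st num
  have h2 : ∀ e : Int, 2 ≤ e → e < 2 → ¬ e ∣ num := by intro e h1 h2; omega
  obtain ⟨hshape, hpair⟩ := factBLoop_shape num 2 (by norm_num) h2
  have hexp := factorizarLoop_eq_expand num 2 (by norm_num) h2
  have hA : (factorizar num).foldl stepA (st.1, PySem.Dict.mk []) =
      ((factBLoop num 2).foldl (fun fc p => if p.1 ∈ fc then fc else fc ++ [p.1]) st.1,
        PySem.Dict.mk (factBLoop num 2)) := by
    rw [factorizar, hexp]
    have := stepA_expand (factBLoop num 2) st.1 [] (fun p hp => (hshape p hp).2) hpair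
      (by simp)
    simpa using this
  have hB : PySem.Dict.ofList (factBLoop num 2) = PySem.Dict.mk (factBLoop num 2) := by
    show PySem.Dict.empty.update (factBLoop num 2) = _
    rw [PySem.Dict.update,
      foldl_insert_fresh (factBLoop num 2) PySem.Dict.empty (by simp [PySem.Dict.contains, PySem.Dict.empty])
        (hpair.imp (fun h => ne_of_lt h))]
    simp [PySem.Dict.empty]
  show (((factorizar num).foldl stepA (st.1, PySem.Dict.mk [])).1,
      st.2.insert num ((factorizar num).foldl stepA (st.1, PySem.Dict.mk [])).2) =
    ((factBLoop num 2).foldl (fun fc p => if p.1 ∈ fc then fc else fc ++ [p.1]) st.1,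
      st.2.insert num (PySem.Dict.ofList (factBLoop num 2)))
  rw [hA, hB]

-- ===== VERDICT (by name: the statement is the Claim_ definition above) =====
theorem obtener_factores_comunes_spec : Claim_equal_obtener_factores_comunes := by
  intro numeros _
  unfold Spec_obtener_factores_comunes obtener_factores_comunes obtener_factores_comunes_alt
  rw [step_eq]
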